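-- pv_equiv track=rewrite | github.com/megyoung430/magnitude-bandit-analysis | src/behavior_analysis/get_variables_across_sessions.py | compute_merged_num_trials_in_block
-- ===== SOURCE A (Python) =====
-- def compute_merged_num_trials_in_block(merged_num_blocks):
--     """
--     merged_num_blocks: list like [1,1,1,2,2,2,3,3,...]
--     returns:           [1,2,3,1,2,3,1,2,...]
--     """
--     out = []
--     prev_block = None
--     count = 0
--     for b in merged_num_blocks:
--         if b != prev_block:
--             count = 1
--             prev_block = b
--         else:
--             count += 1
--         out.append(count)
--     return out
-- ===== SOURCE B (Python) =====
-- from itertools import groupby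
--
-- def compute_merged_num_trials_in_block(merged_num_blocks):
--     out = []
--     for _, group in groupby(merged_num_blocks):
--         out.extend(range(1, sum(1 for _ in group) + 1))
--     return out
-- ===== Notes on version B (the rewrite author's own statement) =====
-- stated objective: idiomatic
-- what changed: Replaces the flat loop with prev/count state by itertools.groupby over maximal runs, emitting range(1, L+1) per run.
import Mathlib
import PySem

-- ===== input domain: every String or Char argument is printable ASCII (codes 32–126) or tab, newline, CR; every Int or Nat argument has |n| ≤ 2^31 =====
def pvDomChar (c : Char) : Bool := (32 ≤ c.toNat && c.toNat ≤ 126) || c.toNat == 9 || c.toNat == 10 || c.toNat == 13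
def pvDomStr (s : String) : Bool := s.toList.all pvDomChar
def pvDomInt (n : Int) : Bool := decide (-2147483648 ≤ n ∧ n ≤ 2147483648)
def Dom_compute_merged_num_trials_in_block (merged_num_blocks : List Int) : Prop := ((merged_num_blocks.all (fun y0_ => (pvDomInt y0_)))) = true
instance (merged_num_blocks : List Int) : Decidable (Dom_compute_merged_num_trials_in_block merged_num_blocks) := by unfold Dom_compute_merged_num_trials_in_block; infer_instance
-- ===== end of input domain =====

-- B replaces A's flat prev/count loop by a groupby-style decomposition into maximal runs,
-- emitting 1..L for each run of length L (idiomatic; same O(n) cost).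


-- ===== PORT A =====
-- state: (out, prev_block, count); `b != prev_block` with prev_block initially None
def pvStepA (st : List Int × Option Int × Int) (b : Int) : List Int × Option Int × Int :=
  if some b ≠ st.2.1 then (st.1 ++ [1], some b, 1)
  else (st.1 ++ [st.2.2 + 1], st.2.1, st.2.2 + 1)

def compute_merged_num_trials_in_block (merged_num_blocks : List Int) : List Int :=
  (merged_num_blocks.foldl pvStepA ([], none, 0)).1

-- ===== PORT B =====
-- groupby: split off the maximal run of the head element, emit range(1, L+1), recurse
def pvAltGo : List Int → List Int
  | [] => []
  | x :: xs =>
    PySem.List.pyRange 1 (((xs.takeWhile (fun y => y == x)).length : Int) + 2) 1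
      ++ pvAltGo (xs.dropWhile (fun y => y == x))
  termination_by l => l.length
  decreasing_by
    simp only [List.length_cons]
    have := List.length_dropWhile_le (p := fun y => y == x) (l := xs)
    omega

def compute_merged_num_trials_in_block_alt (merged_num_blocks : List Int) : List Int :=
  pvAltGo merged_num_blocks

-- ===== PRECONDITION & SPEC =====
def Spec_compute_merged_num_trials_in_block (merged_num_blocks : List Int) (out : List Int) : Prop := out = compute_merged_num_trials_in_block_alt merged_num_blocks
instance (merged_num_blocks : List Int) (out : List Int) : Decidable (Spec_compute_merged_num_trials_in_block merged_num_blocks out) := by unfold Spec_compute_merged_num_trials_in_block; infer_instance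

-- ===== CLAIM (what is proved, stated in full; the proofs are below) =====
def Claim_equal_compute_merged_num_trials_in_block : Prop := ∀ (merged_num_blocks : List Int), Dom_compute_merged_num_trials_in_block merged_num_blocks → Spec_compute_merged_num_trials_in_block merged_num_blocks (compute_merged_num_trials_in_block merged_num_blocks)

-- ===== LEMMAS AND PROOFS =====

-- A's fold, started mid-run with previous element x seen `c` times, emits c+1 .. c+t
-- over the rest of the run (length t) and then behaves like pvAltGo on the remainder.
theorem pvFoldA_run (xs : List Int) : ∀ (acc : List Int) (x c : Int),
    (xs.foldl pvStepA (acc, some x, c)).1 =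
      acc ++ PySem.List.pyRange (c + 1) (c + 1 + ((xs.takeWhile (fun y => y == x)).length : Int)) 1
          ++ pvAltGo (xs.dropWhile (fun y => y == x)) := by
  induction xs with
  | nil => intro acc x c; simp [pvAltGo, PySem.List.pyRange_one_eq_nil]
  | cons y ys ih =>
    intro acc x c
    by_cases h : y = x
    · subst h
      have hstep : pvStepA (acc, some y, c) y = (acc ++ [c + 1], some y, c + 1) := by
        simp [pvStepA]
      simp only [List.foldl_cons, hstep, List.takeWhile_cons, List.dropWhile_cons,
        BEq.rfl, if_true]
      rw [ih (acc ++ [c + 1]) y (c + 1)]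
      have hl : (((y :: ys.takeWhile (fun z => z == y)).length : Int))
          = ((ys.takeWhile (fun z => z == y)).length : Int) + 1 := by
        simp [List.length_cons]
      have hr : PySem.List.pyRange (c + 1) (c + 1 + (((ys.takeWhile (fun z => z == y)).length : Int) + 1)) 1
          = (c + 1) :: PySem.List.pyRange (c + 1 + 1) (c + 1 + 1 + ((ys.takeWhile (fun z => z == y)).length : Int)) 1 := by
        rw [PySem.List.pyRange_one_cons (by omega)]
        congr 1
        · ring_nf
      rw [hl, hr]
      simp
    · have hstep : pvStepA (acc, some x, c) y = (acc ++ [1], some y, 1) := by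
        simp [pvStepA, h]
      have hbeq : (y == x) = false := by simp [h]
      simp only [List.foldl_cons, hstep, List.takeWhile_cons, List.dropWhile_cons, hbeq,
        if_neg Bool.false_ne_true]
      rw [ih (acc ++ [1]) y 1]
      rw [pvAltGo]
      simp only [List.length_nil, Int.natCast_zero, add_zero, PySem.List.pyRange_one_eq_nil (le_refl (c+1)), List.append_nil]
      have hr : PySem.List.pyRange 1 (((ys.takeWhile (fun z => z == y)).length : Int) + 2) 1
          = 1 :: PySem.List.pyRange 2 (2 + ((ys.takeWhile (fun z => z == y)).length : Int)) 1 := by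
        rw [PySem.List.pyRange_one_cons (by omega)]
        congr 1
        · ring_nf
      rw [hr]
      simp

-- ===== VERDICT (by name: the statement is the Claim_ definition above) =====
theorem compute_merged_num_trials_in_block_spec : Claim_equal_compute_merged_num_trials_in_block := by
  intro l _
  unfold Spec_compute_merged_num_trials_in_block compute_merged_num_trials_in_block
    compute_merged_num_trials_in_block_alt
  cases l with
  | nil => simp [pvAltGo]
  | cons x xs =>
    have hstep : pvStepA (([] : List Int), (none : Option Int), (0 : Int)) x = ([1], some x, 1) := by
      simp [pvStepA]
    simp only [List.foldl_cons, hstep]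
    rw [pvFoldA_run xs [1] x 1, pvAltGo]
    have hr : PySem.List.pyRange 1 (((xs.takeWhile (fun y => y == x)).length : Int) + 2) 1
        = 1 :: PySem.List.pyRange 2 (2 + ((xs.takeWhile (fun y => y == x)).length : Int)) 1 := by
      rw [PySem.List.pyRange_one_cons (by omega)]
      congr 1
      · ring_nf
    rw [hr]
    simp
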